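-- pv_equiv track=rewrite | github.com/b-mahjour/virtual_flask_campaign | shared/ms_analysis_script4.py | get_grouped_ms_frames
-- ===== SOURCE A (Python) =====
-- def return_mask(trace_in):
--     current_mask = 1
--     in_group = False
--     mask = []
--     for ii in trace_in:
--         if ii == 0 and in_group == True:
--             current_mask = current_mask + 1
--             in_group = False
--             mask.append(0)
--         elif ii == 0 and in_group == False:
--             mask.append(0)
--         elif ii > 0 and in_group == True:
--             mask.append(current_mask)
--         elif ii > 0 and in_group == False:
--             in_group = True
--             mask.append(current_mask)
--     return mask
--
-- def get_grouped_ms_frames(eic_trace_in, ms_scans):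
--     m = return_mask(eic_trace_in)
--     prev = 0
--     grouped_frames = {}
--     for idx, ii in enumerate(m):
--         if ii > 0:
--             if ii not in grouped_frames:
--                 grouped_frames[ii] = []
--             if ii != prev:
--                 prev = ii
--                 grouped_frames[prev] = []
--             grouped_frames[ii].append(ms_scans[idx])
--     return grouped_frames
-- ===== SOURCE B (Python) =====
-- def get_grouped_ms_frames(eic_trace_in, ms_scans):
--     grouped_frames = {}
--     current = 1
--     in_group = False
--     j = 0
--     for v in eic_trace_in:
--         if v == 0:
--             if in_group:
--                 current += 1
--                 in_group = False
--             j += 1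
--         elif v > 0:
--             in_group = True
--             grouped_frames.setdefault(current, []).append(ms_scans[j])
--             j += 1
--     return grouped_frames
-- ===== Notes on version B (the rewrite author's own statement) =====
-- stated objective: simpler
-- what changed: Fuses A's two passes (return_mask building an intermediate mask list, then a grouping loop over enumerate(mask) with prev/reset bookkeeping) into one loop over eic_trace_in maintaining a group counter, an in-group flag and a cursor into ms_scans, appending via setdefault.
import Mathlib
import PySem

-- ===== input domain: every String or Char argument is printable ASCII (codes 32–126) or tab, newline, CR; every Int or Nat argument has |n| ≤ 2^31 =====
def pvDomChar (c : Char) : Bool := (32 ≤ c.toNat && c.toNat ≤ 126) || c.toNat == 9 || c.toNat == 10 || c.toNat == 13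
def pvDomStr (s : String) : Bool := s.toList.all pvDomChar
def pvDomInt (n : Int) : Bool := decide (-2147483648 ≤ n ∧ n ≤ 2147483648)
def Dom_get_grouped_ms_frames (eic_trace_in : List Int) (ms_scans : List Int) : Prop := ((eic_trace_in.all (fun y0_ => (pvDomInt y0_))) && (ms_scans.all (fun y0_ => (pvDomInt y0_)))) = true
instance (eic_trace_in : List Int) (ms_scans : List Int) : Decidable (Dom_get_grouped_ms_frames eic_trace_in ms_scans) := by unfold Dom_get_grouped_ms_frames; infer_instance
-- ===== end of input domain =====

-- B fuses A's two passes (mask construction + grouping) into one loop with a group counter,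
-- an in-group flag and a cursor into ms_scans; same values, no intermediate mask list (objective: simpler).

-- ===== PORT A =====
-- loop body of Python's return_mask (state = (current_mask, in_group, mask))
def pvMaskStep (st : Int × Bool × List Int) (ii : Int) : Int × Bool × List Int :=
  if ii = 0 ∧ st.2.1 = true then (st.1 + 1, false, st.2.2 ++ [(0 : Int)])
  else if ii = 0 ∧ st.2.1 = false then (st.1, st.2.1, st.2.2 ++ [(0 : Int)])
  else if 0 < ii ∧ st.2.1 = true then (st.1, st.2.1, st.2.2 ++ [st.1])
  else if 0 < ii ∧ st.2.1 = false then (st.1, true, st.2.2 ++ [st.1])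
  else st

def return_mask (trace_in : List Int) : List Int :=
  (trace_in.foldl pvMaskStep (1, false, [])).2.2

-- loop body of A's grouping loop (state = (prev, grouped_frames)); ms_scans[idx] is
-- PySem.List.pyGet? (none exactly where Python raises IndexError — excluded by Pre_; `.getD 0` totalizes)
def pvGroupStep (ms_scans : List Int) (st : Int × PySem.Dict Int (List Int)) (p : Int × Int) :
    Int × PySem.Dict Int (List Int) :=
  if 0 < p.2 then
    let gf := if st.2.contains p.2 then st.2 else st.2.insert p.2 []
    let pg := if p.2 ≠ st.1 then (p.2, gf.insert p.2 []) else (st.1, gf)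
    (pg.1, pg.2.modify p.2 [] (fun l => l ++ [(PySem.List.pyGet? ms_scans p.1).getD 0]))
  else st

def get_grouped_ms_frames (eic_trace_in : List Int) (ms_scans : List Int) : List (Int × List Int) :=
  ((PySem.List.enumerate (return_mask eic_trace_in)).foldl (pvGroupStep ms_scans)
    (0, PySem.Dict.empty)).2.items

-- ===== PORT B =====
-- loop body of B's single fused loop (state = (grouped_frames, current, in_group, j))
def pvAltStep (ms_scans : List Int) (st : PySem.Dict Int (List Int) × Int × Bool × Int) (v : Int) :
    PySem.Dict Int (List Int) × Int × Bool × Int :=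
  if v = 0 then
    (st.1, (if st.2.2.1 then st.2.1 + 1 else st.2.1), (if st.2.2.1 then false else st.2.2.1),
      st.2.2.2 + 1)
  else if 0 < v then
    ((st.1.setdefault st.2.1 []).modify st.2.1 []
        (fun l => l ++ [(PySem.List.pyGet? ms_scans st.2.2.2).getD 0]),
      st.2.1, true, st.2.2.2 + 1)
  else st

def get_grouped_ms_frames_alt (eic_trace_in : List Int) (ms_scans : List Int) : List (Int × List Int) :=
  (eic_trace_in.foldl (pvAltStep ms_scans) (PySem.Dict.empty, 1, false, 0)).1.items

-- ===== PRECONDITION & SPEC =====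
-- Exactly the inputs on which A returns: each positive trace value is looked up in ms_scans at the
-- index equal to the count of nonnegative values before it; A raises IndexError iff some such index
-- is out of range (B raises there too).
def Pre_get_grouped_ms_frames (eic_trace_in : List Int) (ms_scans : List Int) : Prop :=
  ∀ i, i < eic_trace_in.length → 0 < eic_trace_in.getD i 0 →
    ((eic_trace_in.take i).countP (fun x => decide (0 ≤ x))) < ms_scans.length
instance (eic_trace_in : List Int) (ms_scans : List Int) : Decidable (Pre_get_grouped_ms_frames eic_trace_in ms_scans) := by unfold Pre_get_grouped_ms_frames; infer_instance
def pvWitness_get_grouped_ms_frames : List Int × List Int := ([1, 0, -1, 3], [10, 20, 30])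

def Spec_get_grouped_ms_frames (eic_trace_in : List Int) (ms_scans : List Int) (out : List (Int × List Int)) : Prop := out = get_grouped_ms_frames_alt eic_trace_in ms_scans
instance (eic_trace_in : List Int) (ms_scans : List Int) (out : List (Int × List Int)) : Decidable (Spec_get_grouped_ms_frames eic_trace_in ms_scans out) := by unfold Spec_get_grouped_ms_frames; infer_instance

-- ===== CLAIM (what is proved, stated in full; the proofs are below) =====
def Claim_equal_get_grouped_ms_frames : Prop := ∀ (eic_trace_in : List Int) (ms_scans : List Int), Dom_get_grouped_ms_frames eic_trace_in ms_scans → Pre_get_grouped_ms_frames eic_trace_in ms_scans → Spec_get_grouped_ms_frames eic_trace_in ms_scans (get_grouped_ms_frames eic_trace_in ms_scans)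

-- ===== LEMMAS AND PROOFS =====

-- recursive characterisation of return_mask's fold
def pvMaskRec (c : Int) (g : Bool) : List Int → List Int
  | [] => []
  | v :: t =>
    if v = 0 then (if g then (0 : Int) :: pvMaskRec (c + 1) false t else (0 : Int) :: pvMaskRec c false t)
    else if 0 < v then c :: pvMaskRec c true t
    else pvMaskRec c g t

theorem pvMask_foldl (t : List Int) : ∀ (c : Int) (g : Bool) (acc : List Int),
    (t.foldl pvMaskStep (c, g, acc)).2.2 = acc ++ pvMaskRec c g t := by
  induction t with
  | nil => intro c g acc; simp [pvMaskRec]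
  | cons v t ih =>
    intro c g acc
    by_cases hv : v = 0
    · cases g <;> simp [pvMaskStep, pvMaskRec, hv, ih]
    · by_cases hp : 0 < v
      · cases g <;> simp [pvMaskStep, pvMaskRec, hv, hp, ih]
      · cases g <;> simp [pvMaskStep, pvMaskRec, hv, hp, ih]

-- loop invariant tying A's (prev, dict) grouping state to B's (dict, current, in_group) state
def pvInv (c : Int) (g : Bool) (prev : Int) (d : PySem.Dict Int (List Int)) : Prop :=
  0 < c ∧ (if g then prev = c ∧ d.contains c = true else prev < c) ∧
    (∀ k ∈ d.keys, if g then k ≤ c else k < c)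

theorem pvFuse (ms : List Int) (t : List Int) : ∀ (c : Int) (g : Bool) (j prev : Int)
    (d : PySem.Dict Int (List Int)), pvInv c g prev d →
    ((PySem.List.enumerate (pvMaskRec c g t) j).foldl (pvGroupStep ms) (prev, d)).2
      = (t.foldl (pvAltStep ms) (d, c, g, j)).1 := by
  induction t with
  | nil => intro c g j prev d _; simp [pvMaskRec]
  | cons v t ih =>
    intro c g j prev d hinv
    obtain ⟨hc, hg, hkeys⟩ := hinv
    by_cases hv : v = 0
    · cases g with
      | true =>
        simp only [if_true] at hg hkeys
        obtain ⟨hpc, hcontc⟩ := hg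
        rw [show pvMaskRec c true (v :: t) = (0 : Int) :: pvMaskRec (c + 1) false t by
          simp [pvMaskRec, hv]]
        rw [PySem.List.enumerate_cons, List.foldl_cons, List.foldl_cons]
        rw [show pvGroupStep ms (prev, d) (j, 0) = (prev, d) by simp [pvGroupStep]]
        rw [show pvAltStep ms (d, c, true, j) v = (d, c + 1, false, j + 1) by
          simp [pvAltStep, hv]]
        apply ih
        refine ⟨by omega, ?_, ?_⟩
        · simp only [Bool.false_eq_true, if_false]
          omega
        · intro k hk
          have := hkeys k hk
          simp only [Bool.false_eq_true, if_false]
          omega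
      | false =>
        simp only [Bool.false_eq_true, if_false] at hg hkeys
        rw [show pvMaskRec c false (v :: t) = (0 : Int) :: pvMaskRec c false t by
          simp [pvMaskRec, hv]]
        rw [PySem.List.enumerate_cons, List.foldl_cons, List.foldl_cons]
        rw [show pvGroupStep ms (prev, d) (j, 0) = (prev, d) by simp [pvGroupStep]]
        rw [show pvAltStep ms (d, c, false, j) v = (d, c, false, j + 1) by
          simp [pvAltStep, hv]]
        apply ih
        exact ⟨hc, by simpa using hg, by simpa using hkeys⟩
    · by_cases hp : 0 < v
      · cases g with
        | false =>
          -- entering a new group: A inserts [] twice then appends; B setdefault-inserts then appends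
          simp only [Bool.false_eq_true, if_false] at hg hkeys
          have hcont : d.contains c = false := by
            rw [Bool.eq_false_iff]
            intro h
            have := hkeys c ((PySem.Dict.contains_iff_mem_keys d c).mp h)
            omega
          have hprev : c ≠ prev := by omega
          rw [show pvMaskRec c false (v :: t) = c :: pvMaskRec c true t by
            simp [pvMaskRec, hv, hp]]
          rw [PySem.List.enumerate_cons, List.foldl_cons, List.foldl_cons]
          rw [show pvGroupStep ms (prev, d) (j, c) =
              (c, ((d.insert c []).modify c [] (fun l => l ++ [(PySem.List.pyGet? ms j).getD 0]))) by
            simp [pvGroupStep, hc, hcont, hprev, PySem.Dict.insert_insert_self]]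
          rw [show pvAltStep ms (d, c, false, j) v =
              (((d.insert c []).modify c [] (fun l => l ++ [(PySem.List.pyGet? ms j).getD 0])),
                c, true, j + 1) by
            simp [pvAltStep, hv, hp, PySem.Dict.setdefault_of_not_contains d _ hcont]]
          apply ih
          refine ⟨hc, ?_, ?_⟩
          · simp [PySem.Dict.contains_modify]
          · intro k hk
            have hcnt := (PySem.Dict.contains_iff_mem_keys _ k).mpr hk
            rw [PySem.Dict.contains_modify, PySem.Dict.contains_insert] at hcnt
            simp only [Bool.or_eq_true, beq_iff_eq] at hcnt
            simp only [if_true]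
            rcases hcnt with h | h | h
            · omega
            · omega
            · have := hkeys k ((PySem.Dict.contains_iff_mem_keys d k).mp h)
              omega
        | true =>
          -- continuing the current group: both just append to d[c]
          simp only [if_true] at hg hkeys
          obtain ⟨hpc, hcont⟩ := hg
          rw [show pvMaskRec c true (v :: t) = c :: pvMaskRec c true t by
            simp [pvMaskRec, hv, hp]]
          rw [PySem.List.enumerate_cons, List.foldl_cons, List.foldl_cons]
          rw [show pvGroupStep ms (prev, d) (j, c) =
              (prev, (d.modify c [] (fun l => l ++ [(PySem.List.pyGet? ms j).getD 0]))) by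
            simp [pvGroupStep, hc, hcont, hpc]]
          rw [show pvAltStep ms (d, c, true, j) v =
              ((d.modify c [] (fun l => l ++ [(PySem.List.pyGet? ms j).getD 0])), c, true, j + 1) by
            simp [pvAltStep, hv, hp, PySem.Dict.setdefault_of_contains d _ hcont]]
          subst hpc
          apply ih
          refine ⟨hc, ?_, ?_⟩
          · simp [PySem.Dict.contains_modify, hcont]
          · intro k hk
            have hcnt := (PySem.Dict.contains_iff_mem_keys _ k).mpr hk
            rw [PySem.Dict.contains_modify] at hcnt
            simp only [Bool.or_eq_true, beq_iff_eq] at hcnt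
            simp only [if_true]
            rcases hcnt with h | h
            · omega
            · exact hkeys k ((PySem.Dict.contains_iff_mem_keys d k).mp h)
      · -- negative value: A's mask skips it, B's loop does nothing
        rw [show pvMaskRec c g (v :: t) = pvMaskRec c g t by simp [pvMaskRec, hv, hp]]
        rw [List.foldl_cons, show pvAltStep ms (d, c, g, j) v = (d, c, g, j) by
          simp [pvAltStep, hv, hp]]
        exact ih c g j prev d ⟨hc, hg, hkeys⟩

theorem get_grouped_ms_frames_eq (eic ms : List Int) :
    get_grouped_ms_frames eic ms = get_grouped_ms_frames_alt eic ms := by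
  unfold get_grouped_ms_frames get_grouped_ms_frames_alt return_mask
  rw [show ((eic.foldl pvMaskStep (1, false, [])).2.2 : List Int) = pvMaskRec 1 false eic by
    simpa using pvMask_foldl eic 1 false []]
  have h := pvFuse ms eic 1 false 0 0 PySem.Dict.empty
    ⟨by omega, by simp, by simp [PySem.Dict.keys_empty]⟩
  rw [h]

-- ===== VERDICT (by name: the statement is the Claim_ definition above) =====
theorem get_grouped_ms_frames_spec : Claim_equal_get_grouped_ms_frames := by
  intro eic ms _ _
  unfold Spec_get_grouped_ms_frames
  exact get_grouped_ms_frames_eq eic ms
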